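-- pv_equiv track=rewrite | github.com/AccSrd/BUAA_Course_Automation | 必修课程-3系/模式识别与智能系统技术/AI_Homework_A star.py | get_all_valid_loc
-- ===== SOURCE A (Python) =====
-- env_data = [[0, 0, 0, 0, 0, 0, 0, 1, 0, 0],
--             [2, 0, 0, 2, 0, 0, 0, 0, 2, 0],
--             [0, 0, 0, 0, 0, 2, 0, 0, 0, 0],
--             [0, 0, 2, 2, 2, 2, 2, 0, 2, 0],
--             [0, 0, 0, 0, 0, 0, 0, 0, 2, 0],
--             [0, 0, 0, 2, 2, 0, 0, 0, 2, 2],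
--             [0, 0, 0, 0, 0, 0, 0, 2, 2, 3],
--             [0, 0, 2, 0, 2, 2, 2, 2, 0, 0],
--             [0, 0, 2, 0, 0, 0, 0, 0, 0, 0],
--             [2, 0, 2, 0, 0, 0, 0, 0, 2, 0]]
--
-- orders = ['u', 'd', 'l', 'r','ul','ur','dl','dr']
--
-- def valid_actions(loc):
--     loc_actions = []
--     for order in orders:
--         if is_move_valid(loc, order):
--             loc_actions.append(order)
--     return loc_actions
--
-- def is_move_valid(loc, act):
--     x = loc[0] - 1
--     y = loc[1] - 1
--     if act not in orders:
--         return False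
--     else:
--         if   act == orders[0]:#u
--             return x != 0 and env_data[x-1][y] != 2
--         elif act == orders[1]:#d
--             return x != len(env_data)-1 and env_data[x+1][y] != 2
--         elif act == orders[2]:#l
--             return y != 0 and env_data[x][y-1] != 2
--         elif act == orders[3]:#r
--             return y != len(env_data[0])-1 and env_data[x][y+1] != 2
--         elif act == orders[4]:#ul
--             return x != 0 and y != 0 and env_data[x-1][y-1] != 2
--         elif act == orders[5]:#ur
--             return x != 0 and y != len(env_data[0])-1 and env_data[x-1][y+1] != 2
--         elif act == orders[6]:#dl
--             return x != len(env_data)-1 and y != 0 and env_data[x+1][y-1] != 2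
--         else:                 #dr
--             return x != len(env_data)-1 and y != len(env_data[0])-1 and env_data[x+1][y+1] != 2
--
-- def get_all_valid_loc(loc):
--     all_valid_data = []
--     cur_acts = valid_actions(loc)
--     for act in cur_acts:
--         all_valid_data.append(move_robot(loc, act))
--     if loc in all_valid_data:
--         all_valid_data.remove(loc)
--     return all_valid_data
--
-- def move_robot(loc, act):
--     if is_move_valid(loc, act):
--         if   act == orders[0]:#u
--             return loc[0] - 1, loc[1]
--         elif act == orders[1]:#d
--             return loc[0] + 1, loc[1]
--         elif act == orders[2]:#l
--             return loc[0], loc[1] - 1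
--         elif act == orders[3]:#r
--             return loc[0], loc[1] + 1
--         elif act == orders[4]:#ul
--             return loc[0] - 1, loc[1] - 1
--         elif act == orders[5]:#ur
--             return loc[0] - 1, loc[1] + 1
--         elif act == orders[6]:#dl
--             return loc[0] + 1, loc[1] - 1
--         else:                 #dr
--             return loc[0] + 1, loc[1] + 1
--     else:
--         return loc
-- ===== SOURCE B (Python) =====
-- env_data = [[0, 0, 0, 0, 0, 0, 0, 1, 0, 0],
--             [2, 0, 0, 2, 0, 0, 0, 0, 2, 0],
--             [0, 0, 0, 0, 0, 2, 0, 0, 0, 0],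
--             [0, 0, 2, 2, 2, 2, 2, 0, 2, 0],
--             [0, 0, 0, 0, 0, 0, 0, 0, 2, 0],
--             [0, 0, 0, 2, 2, 0, 0, 0, 2, 2],
--             [0, 0, 0, 0, 0, 0, 0, 2, 2, 3],
--             [0, 0, 2, 0, 2, 2, 2, 2, 0, 0],
--             [0, 0, 2, 0, 0, 0, 0, 0, 0, 0],
--             [2, 0, 2, 0, 0, 0, 0, 0, 2, 0]]
--
-- # same neighbour order as orders = ['u','d','l','r','ul','ur','dl','dr']
-- _OFFSETS = [(-1, 0), (1, 0), (0, -1), (0, 1),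
--             (-1, -1), (-1, 1), (1, -1), (1, 1)]
--
-- def get_all_valid_loc(loc):
--     x = loc[0] - 1
--     y = loc[1] - 1
--     res = []
--     for dx, dy in _OFFSETS:
--         if dx < 0 and x == 0:
--             continue
--         if dx > 0 and x == len(env_data) - 1:
--             continue
--         if dy < 0 and y == 0:
--             continue
--         if dy > 0 and y == len(env_data[0]) - 1:
--             continue
--         if env_data[x + dx][y + dy] != 2:
--             res.append((loc[0] + dx, loc[1] + dy))
--     return res
-- ===== Notes on version B (the rewrite author's own statement) =====
-- stated objective: simpler
-- what changed: Replaces the three-helper string dispatch (valid_actions over action names, is_move_valid with eight per-action branches, move_robot re-dispatching on the name, plus a dead loc-removal step) with one pass over an ordered (dx,dy) offset table with uniform boundary guards.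
import Mathlib
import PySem

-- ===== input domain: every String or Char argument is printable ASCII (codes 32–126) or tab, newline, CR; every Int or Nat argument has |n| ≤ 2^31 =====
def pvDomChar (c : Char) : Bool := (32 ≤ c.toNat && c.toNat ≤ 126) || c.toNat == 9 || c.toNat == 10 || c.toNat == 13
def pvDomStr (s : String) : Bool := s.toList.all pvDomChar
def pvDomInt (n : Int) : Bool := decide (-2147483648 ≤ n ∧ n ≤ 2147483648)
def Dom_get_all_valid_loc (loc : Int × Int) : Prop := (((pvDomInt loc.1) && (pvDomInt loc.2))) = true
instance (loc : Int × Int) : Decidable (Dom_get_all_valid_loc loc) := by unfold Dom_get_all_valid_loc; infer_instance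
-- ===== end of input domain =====

-- B replaces A's per-action string dispatch (valid_actions / is_move_valid / move_robot)
-- with a single pass over an ordered (dx,dy) offset table; objective: simpler.

-- ===== PORT A =====
-- module constant env_data (shared verbatim by both Pythons)
def envData : List (List Int) :=
  [[0, 0, 0, 0, 0, 0, 0, 1, 0, 0],
   [2, 0, 0, 2, 0, 0, 0, 0, 2, 0],
   [0, 0, 0, 0, 0, 2, 0, 0, 0, 0],
   [0, 0, 2, 2, 2, 2, 2, 0, 2, 0],
   [0, 0, 0, 0, 0, 0, 0, 0, 2, 0],
   [0, 0, 0, 2, 2, 0, 0, 0, 2, 2],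
   [0, 0, 0, 0, 0, 0, 0, 2, 2, 3],
   [0, 0, 2, 0, 2, 2, 2, 2, 0, 0],
   [0, 0, 2, 0, 0, 0, 0, 0, 0, 0],
   [2, 0, 2, 0, 0, 0, 0, 0, 2, 0]]

def ordersA : List String := ["u", "d", "l", "r", "ul", "ur", "dl", "dr"]

-- env_data[i][j] with Python (possibly negative) indexing; defaults unreachable under Pre_
def envAt (i j : Int) : Int :=
  PySem.List.pyGetD (PySem.List.pyGetD envData i []) j 0

def is_move_valid (loc : Int × Int) (act : String) : Bool :=
  let x := loc.1 - 1
  let y := loc.2 - 1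
  if ¬ (act ∈ ordersA) then false
  else if act == "u" then (x != 0) && (envAt (x-1) y != 2)
  else if act == "d" then (x != (envData.length : Int) - 1) && (envAt (x+1) y != 2)
  else if act == "l" then (y != 0) && (envAt x (y-1) != 2)
  else if act == "r" then (y != ((PySem.List.pyGetD envData 0 []).length : Int) - 1) && (envAt x (y+1) != 2)
  else if act == "ul" then (x != 0) && (y != 0) && (envAt (x-1) (y-1) != 2)
  else if act == "ur" then (x != 0) && (y != ((PySem.List.pyGetD envData 0 []).length : Int) - 1) && (envAt (x-1) (y+1) != 2)
  else if act == "dl" then (x != (envData.length : Int) - 1) && (y != 0) && (envAt (x+1) (y-1) != 2)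
  else (x != (envData.length : Int) - 1) && (y != ((PySem.List.pyGetD envData 0 []).length : Int) - 1) && (envAt (x+1) (y+1) != 2)

def valid_actions (loc : Int × Int) : List String :=
  ordersA.foldl (fun acc order => if is_move_valid loc order then acc ++ [order] else acc) []

def move_robot (loc : Int × Int) (act : String) : Int × Int :=
  if is_move_valid loc act then
    if act == "u" then (loc.1 - 1, loc.2)
    else if act == "d" then (loc.1 + 1, loc.2)
    else if act == "l" then (loc.1, loc.2 - 1)
    else if act == "r" then (loc.1, loc.2 + 1)
    else if act == "ul" then (loc.1 - 1, loc.2 - 1)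
    else if act == "ur" then (loc.1 - 1, loc.2 + 1)
    else if act == "dl" then (loc.1 + 1, loc.2 - 1)
    else (loc.1 + 1, loc.2 + 1)
  else loc

def get_all_valid_loc (loc : Int × Int) : List (Int × Int) :=
  let all_valid_data :=
    (valid_actions loc).foldl (fun acc act => acc ++ [move_robot loc act]) []
  if loc ∈ all_valid_data then
    (PySem.List.remove? all_valid_data loc).getD all_valid_data
  else all_valid_data

-- ===== PORT B =====
-- ordered offset table, same neighbour order as orders
def offsetsB : List (Int × Int) :=
  [(-1, 0), (1, 0), (0, -1), (0, 1), (-1, -1), (-1, 1), (1, -1), (1, 1)]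

def get_all_valid_loc_alt (loc : Int × Int) : List (Int × Int) :=
  let x := loc.1 - 1
  let y := loc.2 - 1
  offsetsB.foldl (fun res d =>
    if d.1 < 0 && x == 0 then res
    else if d.1 > 0 && x == (envData.length : Int) - 1 then res
    else if d.2 < 0 && y == 0 then res
    else if d.2 > 0 && y == ((PySem.List.pyGetD envData 0 []).length : Int) - 1 then res
    else if PySem.List.pyGetD (PySem.List.pyGetD envData (x + d.1) []) (y + d.2) 0 != 2 then
      res ++ [(loc.1 + d.1, loc.2 + d.2)]
    else res) []

-- ===== PRECONDITION & SPEC =====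
-- Pre_ excludes exactly the locations where Python A raises IndexError
-- (an index ≥ 10 or < -10 reaches env_data): A returns iff each coordinate is between -8 and 10.
def Pre_get_all_valid_loc (loc : Int × Int) : Prop :=
  -8 ≤ loc.1 ∧ loc.1 ≤ 10 ∧ -8 ≤ loc.2 ∧ loc.2 ≤ 10
instance (loc : Int × Int) : Decidable (Pre_get_all_valid_loc loc) := by
  unfold Pre_get_all_valid_loc; infer_instance

def pvWitness_get_all_valid_loc : (Int × Int) := (1, 1)

def Spec_get_all_valid_loc (loc : Int × Int) (out : List (Int × Int)) : Prop := out = get_all_valid_loc_alt loc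
instance (loc : Int × Int) (out : List (Int × Int)) : Decidable (Spec_get_all_valid_loc loc out) := by unfold Spec_get_all_valid_loc; infer_instance

-- ===== CLAIM (what is proved, stated in full; the proofs are below) =====
def Claim_equal_get_all_valid_loc : Prop := ∀ (loc : Int × Int), Dom_get_all_valid_loc loc → Pre_get_all_valid_loc loc → Spec_get_all_valid_loc loc (get_all_valid_loc loc)

-- ===== LEMMAS AND PROOFS =====
theorem ports_agree_on_box :
    ∀ x ∈ Finset.Icc (-8 : ℤ) 10, ∀ y ∈ Finset.Icc (-8 : ℤ) 10,
      get_all_valid_loc (x, y) = get_all_valid_loc_alt (x, y) := by decide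

-- ===== VERDICT (by name: the statement is the Claim_ definition above) =====
theorem get_all_valid_loc_spec : Claim_equal_get_all_valid_loc := by
  intro loc _ hpre
  obtain ⟨x, y⟩ := loc
  obtain ⟨h1, h2, h3, h4⟩ := hpre
  exact ports_agree_on_box x (Finset.mem_Icc.mpr ⟨h1, h2⟩) y (Finset.mem_Icc.mpr ⟨h3, h4⟩)
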